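-- pv_equiv track=rewrite | github.com/uh-bhinav/Lokpath | Itinerary builder/utils/itinerary_utils.py | infer_kid_friendly
-- ===== SOURCE A (Python) =====
-- def infer_kid_friendly(tags):
--     """
--     Infer if a place is kid-friendly based on its tags.
--     """
--     kid_friendly_tags = ["family-friendly", "safe", "peaceful", "nature", "cultural"]
--     not_kid_friendly_tags = ["crowded", "adventurous", "trek", "romantic"]
--
--     if any(tag in kid_friendly_tags for tag in tags):
--         return True
--     elif any(tag in not_kid_friendly_tags for tag in tags):
--         return False
--     else:
--         return None  # Unknown
-- ===== SOURCE B (Python) =====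
-- def infer_kid_friendly(tags):
--     """
--     Infer if a place is kid-friendly based on its tags.
--     Single pass: kid-friendly wins immediately; not-kid-friendly is remembered.
--     """
--     kid_friendly_tags = {"family-friendly", "safe", "peaceful", "nature", "cultural"}
--     not_kid_friendly_tags = {"crowded", "adventurous", "trek", "romantic"}
--     found_not_friendly = False
--     for tag in tags:
--         if tag in kid_friendly_tags:
--             return True
--         if tag in not_kid_friendly_tags:
--             found_not_friendly = True
--     return False if found_not_friendly else None
-- ===== Notes on version B (the rewrite author's own statement) =====
-- stated objective: faster
-- what changed: Replaces A's two separate any() list-membership scans over tags with one loop that returns True on the first kid-friendly tag and maintains a found_not_friendly flag (set membership), deciding False/None after the single pass.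
import Mathlib
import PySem

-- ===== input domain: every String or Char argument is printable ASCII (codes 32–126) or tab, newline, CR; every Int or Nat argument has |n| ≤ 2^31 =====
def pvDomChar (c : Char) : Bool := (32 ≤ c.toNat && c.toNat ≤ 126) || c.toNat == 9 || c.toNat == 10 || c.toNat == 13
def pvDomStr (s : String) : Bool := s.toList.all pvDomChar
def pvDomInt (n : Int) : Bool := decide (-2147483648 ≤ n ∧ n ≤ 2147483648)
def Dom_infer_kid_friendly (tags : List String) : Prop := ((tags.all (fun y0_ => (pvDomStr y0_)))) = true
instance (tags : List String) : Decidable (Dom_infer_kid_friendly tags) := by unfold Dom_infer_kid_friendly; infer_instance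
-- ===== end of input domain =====

-- B replaces A's two any() scans with one single-pass loop keeping a found_not_friendly flag (alternative decomposition, same value).
-- ===== PORT A =====
def infer_kid_friendly (tags : List String) : Option Bool :=
  let kid_friendly_tags := ["family-friendly", "safe", "peaceful", "nature", "cultural"]
  let not_kid_friendly_tags := ["crowded", "adventurous", "trek", "romantic"]
  if tags.any (fun tag => kid_friendly_tags.contains tag) then
    some true
  else if tags.any (fun tag => not_kid_friendly_tags.contains tag) then
    some false
  else
    none

-- ===== PORT B =====
def ikfKid : List String := ["family-friendly", "safe", "peaceful", "nature", "cultural"]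
def ikfNot : List String := ["crowded", "adventurous", "trek", "romantic"]

def ikfLoop : List String → Bool → Option Bool
  | [], found_not_friendly => if found_not_friendly then some false else none
  | tag :: rest, found_not_friendly =>
    if ikfKid.contains tag then some true
    else if ikfNot.contains tag then ikfLoop rest true
    else ikfLoop rest found_not_friendly

def infer_kid_friendly_alt (tags : List String) : Option Bool :=
  ikfLoop tags false

-- ===== PRECONDITION & SPEC =====
def Spec_infer_kid_friendly (tags : List String) (out : Option Bool) : Prop := out = infer_kid_friendly_alt tags
instance (tags : List String) (out : Option Bool) : Decidable (Spec_infer_kid_friendly tags out) := by unfold Spec_infer_kid_friendly; infer_instance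

-- ===== CLAIM (what is proved, stated in full; the proofs are below) =====
def Claim_equal_infer_kid_friendly : Prop := ∀ (tags : List String), Dom_infer_kid_friendly tags → Spec_infer_kid_friendly tags (infer_kid_friendly tags)

-- ===== LEMMAS AND PROOFS =====

-- ===== VERDICT (by name: the statement is the Claim_ definition above) =====
theorem ikfLoop_char (tags : List String) (found : Bool) :
    ikfLoop tags found =
      if tags.any (fun tag => ikfKid.contains tag) then some true
      else if found || tags.any (fun tag => ikfNot.contains tag) then some false
      else none := by
  induction tags generalizing found with
  | nil => simp [ikfLoop]
  | cons t rest ih =>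
    simp only [ikfLoop, List.any_cons]
    by_cases hk : t ∈ ikfKid
    · simp [hk]
    · by_cases hn : t ∈ ikfNot <;> by_cases hf : found = true <;>
        simp [hk, hn, hf, ih]

theorem infer_kid_friendly_spec : Claim_equal_infer_kid_friendly := by
  intro tags _
  unfold Spec_infer_kid_friendly infer_kid_friendly infer_kid_friendly_alt
  rw [ikfLoop_char]
  simp [ikfKid, ikfNot]
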